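-- pv_equiv track=rewrite | github.com/ilydouble/metacog | final_check.py | count_beautiful
-- ===== SOURCE A (Python) =====
-- def count_beautiful(b):
--     """Count b-eautiful integers for base b."""
--     count = 0
--     solutions = []
--     for d1 in range(1, b):
--         for d0 in range(b):
--             n = d1 * b + d0
--             s = d1 + d0
--             if s * s == n:
--                 count += 1
--                 solutions.append((d1, d0, n))
--     return count, solutions
-- ===== SOURCE B (Python) =====
-- def count_beautiful(b):
--     """Count b-eautiful integers for base b."""
--     count = 0
--     solutions = []
--     for s in range(0, 2 * b - 1):
--         n = s * s
--         d1 = n // b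
--         d0 = n % b
--         if 1 <= d1 < b and d1 + d0 == s:
--             count += 1
--             solutions.append((d1, d0, n))
--     return count, solutions
-- ===== Notes on version B (the rewrite author's own statement) =====
-- stated objective: faster
-- what changed: Instead of scanning all b*(b-1) digit pairs, B iterates over the digit sum s in [0, 2b-2], sets n = s*s, derives the digits as n//b and n%b, and keeps s when the digits are in range and sum back to s.
import Mathlib
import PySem

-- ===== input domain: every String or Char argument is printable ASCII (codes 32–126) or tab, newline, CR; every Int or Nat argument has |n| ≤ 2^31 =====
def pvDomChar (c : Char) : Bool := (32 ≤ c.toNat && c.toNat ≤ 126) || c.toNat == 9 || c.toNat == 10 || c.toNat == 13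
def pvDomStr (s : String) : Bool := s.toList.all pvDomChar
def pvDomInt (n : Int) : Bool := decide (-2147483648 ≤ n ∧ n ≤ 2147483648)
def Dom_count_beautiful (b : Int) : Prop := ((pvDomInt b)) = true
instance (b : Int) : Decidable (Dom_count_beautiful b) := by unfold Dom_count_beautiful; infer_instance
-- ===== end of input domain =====

-- B enumerates the digit sum s and tests n = s*s directly: O(b) instead of A's O(b^2) double loop.

-- ===== PORT A =====
def count_beautiful (b : Int) : Int × (List (Int × Int × Int)) :=
  (PySem.List.pyRange 1 b 1).foldl (fun st d1 =>
    (PySem.List.pyRange 0 b 1).foldl (fun st2 d0 =>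
      let n := d1 * b + d0
      let s := d1 + d0
      if s * s == n then (st2.1 + 1, st2.2 ++ [(d1, d0, n)]) else st2) st) (0, [])

-- ===== PORT B =====
def count_beautiful_alt (b : Int) : Int × (List (Int × Int × Int)) :=
  (PySem.List.pyRange 0 (2 * b - 1) 1).foldl (fun st s =>
    let n := s * s
    let d1 := PySem.Int.floordiv n b
    let d0 := PySem.Int.mod n b
    if 1 ≤ d1 ∧ d1 < b ∧ d1 + d0 = s then (st.1 + 1, st.2 ++ [(d1, d0, n)]) else st) (0, [])

-- ===== PRECONDITION & SPEC =====
def Spec_count_beautiful (b : Int) (out : Int × (List (Int × Int × Int))) : Prop := out = count_beautiful_alt b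
instance (b : Int) (out : Int × (List (Int × Int × Int))) : Decidable (Spec_count_beautiful b out) := by unfold Spec_count_beautiful; infer_instance

-- ===== CLAIM (what is proved, stated in full; the proofs are below) =====
def Claim_equal_count_beautiful : Prop := ∀ (b : Int), Dom_count_beautiful b → Spec_count_beautiful b (count_beautiful b)

-- ===== LEMMAS AND PROOFS =====

-- the list A produces, in closed form
def blkA (b d1 : Int) : List (Int × Int × Int) :=
  ((PySem.List.pyRange 0 b 1).filter (fun d0 => (d1 + d0) * (d1 + d0) == d1 * b + d0)).map
    (fun d0 => (d1, d0, d1 * b + d0))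

def LA (b : Int) : List (Int × Int × Int) := (PySem.List.pyRange 1 b 1).flatMap (blkA b)

-- the list B produces, in closed form
def qB (b s : Int) : Bool :=
  decide (1 ≤ PySem.Int.floordiv (s * s) b ∧ PySem.Int.floordiv (s * s) b < b ∧
          PySem.Int.floordiv (s * s) b + PySem.Int.mod (s * s) b = s)

def hB (b s : Int) : Int × Int × Int :=
  (PySem.Int.floordiv (s * s) b, PySem.Int.mod (s * s) b, s * s)

def LB (b : Int) : List (Int × Int × Int) := ((PySem.List.pyRange 0 (2 * b - 1) 1).filter (qB b)).map (hB b)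

-- the common membership characterisation
def Good (b : Int) (x : Int × Int × Int) : Prop :=
  1 ≤ x.1 ∧ x.1 < b ∧ 0 ≤ x.2.1 ∧ x.2.1 < b ∧ x.2.2 = x.1 * b + x.2.1 ∧
  (x.1 + x.2.1) * (x.1 + x.2.1) = x.2.2

lemma foldl_pair_if {α β : Type} (p : α → Prop) [DecidablePred p] (f : α → β)
    (l : List α) (c : Int) (acc : List β) :
    l.foldl (fun st x => if p x then (st.1 + 1, st.2 ++ [f x]) else st) (c, acc)
      = (c + (((l.filter (fun x => decide (p x))).length : Nat) : Int),
         acc ++ (l.filter (fun x => decide (p x))).map f) := by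
  induction l generalizing c acc with
  | nil => simp
  | cons h t ih =>
    by_cases hp : p h
    · simp [hp, ih]; omega
    · simp [hp, ih]

lemma foldl_pair_blocks {α β : Type} (L : α → List β) (l : List α) (c : Int) (acc : List β) :
    l.foldl (fun st x => (st.1 + ((L x).length : Int), st.2 ++ L x)) (c, acc)
      = (c + ((l.flatMap L).length : Int), acc ++ l.flatMap L) := by
  induction l generalizing c acc with
  | nil => simp
  | cons h t ih => simp [ih]; omega

lemma portA_closed (b : Int) : count_beautiful b = (((LA b).length : Int), LA b) := by
  unfold count_beautiful LA
  have hinner : (fun (st : Int × List (Int × Int × Int)) d1 =>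
      (PySem.List.pyRange 0 b 1).foldl (fun st2 d0 =>
        let n := d1 * b + d0
        let s := d1 + d0
        if s * s == n then (st2.1 + 1, st2.2 ++ [(d1, d0, n)]) else st2) st)
      = fun st d1 => (st.1 + (((blkA b d1).length : Nat) : Int), st.2 ++ blkA b d1) := by
    funext st d1
    rcases st with ⟨c, acc⟩
    rw [foldl_pair_if (p := fun d0 => ((d1 + d0) * (d1 + d0) == d1 * b + d0) = true)
        (f := fun d0 => (d1, d0, d1 * b + d0))]
    simp only [Bool.decide_coe]
    simp [blkA]
  rw [hinner, foldl_pair_blocks (L := blkA b)]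
  simp

lemma portB_closed (b : Int) : count_beautiful_alt b = (((LB b).length : Int), LB b) := by
  unfold count_beautiful_alt LB qB hB
  show (PySem.List.pyRange 0 (2 * b - 1) 1).foldl (fun st s =>
      if 1 ≤ PySem.Int.floordiv (s * s) b ∧ PySem.Int.floordiv (s * s) b < b ∧
          PySem.Int.floordiv (s * s) b + PySem.Int.mod (s * s) b = s then
        (st.1 + 1, st.2 ++ [(PySem.Int.floordiv (s * s) b, PySem.Int.mod (s * s) b, s * s)])
      else st) (0, []) = _
  rw [foldl_pair_if (p := fun s => 1 ≤ PySem.Int.floordiv (s * s) b ∧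
        PySem.Int.floordiv (s * s) b < b ∧
        PySem.Int.floordiv (s * s) b + PySem.Int.mod (s * s) b = s)
      (f := fun s => (PySem.Int.floordiv (s * s) b, PySem.Int.mod (s * s) b, s * s))]
  simp

lemma mem_LA (b : Int) (x : Int × Int × Int) : x ∈ LA b ↔ Good b x := by
  rcases x with ⟨a1, a2, a3⟩
  unfold LA blkA Good
  simp only [List.mem_flatMap, List.mem_map, List.mem_filter,
    PySem.List.mem_pyRange_one, beq_iff_eq, Prod.mk.injEq]
  constructor
  · rintro ⟨d1, ⟨h1, h2⟩, d0, ⟨⟨h3, h4⟩, h5⟩, rfl, rfl, rfl⟩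
    exact ⟨h1, h2, h3, h4, rfl, h5⟩
  · rintro ⟨h1, h2, h3, h4, h5, h6⟩
    exact ⟨a1, ⟨h1, h2⟩, a2, ⟨⟨h3, h4⟩, h6.trans h5⟩, rfl, rfl, h5.symm⟩

lemma mem_LB (b : Int) (x : Int × Int × Int) : x ∈ LB b ↔ Good b x := by
  rcases x with ⟨a1, a2, a3⟩
  unfold LB qB hB Good
  simp only [List.mem_map, List.mem_filter, PySem.List.mem_pyRange_one,
    decide_eq_true_eq, Prod.mk.injEq]
  constructor
  · rintro ⟨s, ⟨⟨hs0, hs1⟩, hq1, hq2, hq3⟩, rfl, rfl, rfl⟩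
    have hb : 0 < b := by omega
    have hm0 := PySem.Int.mod_nonneg (s * s) hb
    have hml := PySem.Int.mod_lt (s * s) hb
    have hdm := PySem.Int.floordiv_mul_add_mod (s * s) b
    refine ⟨hq1, hq2, hm0, hml, by linarith, by rw [hq3]⟩
  · rintro ⟨h1, h2, h3, h4, h5, h6⟩
    have hb : 0 < b := by omega
    have hfd : PySem.Int.floordiv ((a1 + a2) * (a1 + a2)) b = a1 := by
      rw [PySem.Int.floordiv_eq_iff_of_pos hb, h6, h5]
      constructor <;> nlinarith
    have hdm := PySem.Int.floordiv_mul_add_mod ((a1 + a2) * (a1 + a2)) b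
    rw [hfd] at hdm
    have hmd : PySem.Int.mod ((a1 + a2) * (a1 + a2)) b = a2 := by
      have : (a1 + a2) * (a1 + a2) = a1 * b + a2 := h6.trans h5
      linarith
    refine ⟨a1 + a2, ⟨⟨by omega, by omega⟩, ?_, ?_, ?_⟩, hfd, hmd, h6⟩
    · rw [hfd]; exact h1
    · rw [hfd]; exact h2
    · rw [hfd, hmd]

lemma pairwise_LA (b : Int) : (LA b).Pairwise (fun x y => x.2.2 < y.2.2) := by
  unfold LA
  rw [List.pairwise_flatMap]
  constructor
  · intro d1 _
    unfold blkA
    rw [List.pairwise_map]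
    refine List.Pairwise.imp_of_mem ?_
      (List.Pairwise.sublist List.filter_sublist (PySem.List.pairwise_lt_pyRange_one 0 b))
    intro x y _ _ hlt
    simpa using by linarith
  · refine List.Pairwise.imp_of_mem ?_ (PySem.List.pairwise_lt_pyRange_one 1 b)
    intro d1 d1' hd1 hd1' hlt x hx y hy
    have h1 := PySem.List.mem_pyRange_one.1 hd1
    unfold blkA at hx hy
    simp only [List.mem_map, List.mem_filter, PySem.List.mem_pyRange_one] at hx hy
    rcases hx with ⟨d0, ⟨⟨hl0, hu0⟩, _⟩, rfl⟩
    rcases hy with ⟨d0', ⟨⟨hl0', _⟩, _⟩, rfl⟩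
    have hb : 0 < b := by omega
    have hstep : (d1 + 1) * b ≤ d1' * b :=
      mul_le_mul_of_nonneg_right (by omega) (le_of_lt hb)
    simp only []
    nlinarith

lemma pairwise_LB (b : Int) : (LB b).Pairwise (fun x y => x.2.2 < y.2.2) := by
  unfold LB
  rw [List.pairwise_map]
  refine List.Pairwise.imp_of_mem ?_
    (List.Pairwise.sublist List.filter_sublist (PySem.List.pairwise_lt_pyRange_one 0 (2 * b - 1)))
  intro x y hx _ hlt
  have hx0 : 0 ≤ x := (PySem.List.mem_pyRange_one.1 (List.mem_of_mem_filter hx)).1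
  simp only [hB]
  nlinarith

lemma eq_of_key_pairwise {β : Type} (key : β → Int) :
    ∀ (l1 l2 : List β), l1.Pairwise (fun x y => key x < key y) →
      l2.Pairwise (fun x y => key x < key y) → (∀ x, x ∈ l1 ↔ x ∈ l2) → l1 = l2 := by
  intro l1
  induction l1 with
  | nil =>
    intro l2 _ _ hm
    cases l2 with
    | nil => rfl
    | cons a t => exact absurd ((hm a).2 (List.mem_cons_self)) (List.not_mem_nil)
  | cons a t ih =>
    intro l2 h1 h2 hm
    cases l2 with
    | nil => exact absurd ((hm a).1 (List.mem_cons_self)) (List.not_mem_nil)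
    | cons c t2 =>
      rw [List.pairwise_cons] at h1 h2
      have ha2 : a ∈ c :: t2 := (hm a).1 (List.mem_cons_self)
      have hc1 : c ∈ a :: t := (hm c).2 (List.mem_cons_self)
      have hac : a = c := by
        rcases List.mem_cons.1 ha2 with h | hat2
        · exact h
        · rcases List.mem_cons.1 hc1 with h | hct
          · exact h.symm
          · exact absurd (h1.1 c hct) (by have := h2.1 a hat2; omega)
      subst hac
      have hmt : ∀ x, x ∈ t ↔ x ∈ t2 := by
        intro x
        constructor
        · intro hx
          have hkey := h1.1 x hx
          rcases List.mem_cons.1 ((hm x).1 (List.mem_cons_of_mem a hx)) with h | h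
          · exact absurd hkey (by rw [h]; omega)
          · exact h
        · intro hx
          have hkey := h2.1 x hx
          rcases List.mem_cons.1 ((hm x).2 (List.mem_cons_of_mem a hx)) with h | h
          · exact absurd hkey (by rw [h]; omega)
          · exact h
      rw [ih t2 h1.2 h2.2 hmt]

lemma LA_eq_LB (b : Int) : LA b = LB b :=
  eq_of_key_pairwise (fun x => x.2.2) (LA b) (LB b) (pairwise_LA b) (pairwise_LB b)
    (fun x => (mem_LA b x).trans (mem_LB b x).symm)

-- ===== VERDICT (by name: the statement is the Claim_ definition above) =====
theorem count_beautiful_spec : Claim_equal_count_beautiful := by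
  intro b _
  unfold Spec_count_beautiful
  rw [portA_closed, portB_closed, LA_eq_LB]
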